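-- pv_equiv track=rewrite | github.com/kevinputnam/pygame_battletech | combat/2023_01_09.py | get_range_band
-- ===== SOURCE A (Python) =====
-- range_max_values = [1,6,24,42,60,61]
--
-- def get_range_band(current_range):
--     counter = 0
--     for r in range_max_values:
--         if current_range <= r:
--             break
--         counter += 1
--     if counter == len(range_max_values):
--         counter -= 1
--     return counter
-- ===== SOURCE B (Python) =====
-- import bisect
--
-- range_max_values = [1, 6, 24, 42, 60, 61]
--
-- def get_range_band(current_range):
--     return min(bisect.bisect_left(range_max_values, current_range),
--                len(range_max_values) - 1)
-- ===== Notes on version B (the rewrite author's own statement) =====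
-- stated objective: idiomatic
-- what changed: Replaces the counting linear scan with a binary search: bisect_left gives the count of thresholds below current_range, and min clamps the above-max case to 5.
import Mathlib
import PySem

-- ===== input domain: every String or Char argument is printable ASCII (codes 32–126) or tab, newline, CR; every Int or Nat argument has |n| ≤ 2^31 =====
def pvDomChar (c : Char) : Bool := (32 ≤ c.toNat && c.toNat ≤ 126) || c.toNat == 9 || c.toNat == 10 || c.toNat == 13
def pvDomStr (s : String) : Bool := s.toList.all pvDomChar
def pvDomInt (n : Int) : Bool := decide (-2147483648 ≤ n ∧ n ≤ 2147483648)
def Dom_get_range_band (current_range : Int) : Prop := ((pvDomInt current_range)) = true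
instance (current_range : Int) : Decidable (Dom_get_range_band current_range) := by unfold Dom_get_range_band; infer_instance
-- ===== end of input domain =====

-- B replaces A's counting linear scan with a binary search (bisect_left) over the
-- sorted thresholds, clamped with min; objective: idiomatic.

def range_max_values : List Int := [1, 6, 24, 42, 60, 61]

-- ===== PORT A =====
-- the for-loop with break: count list elements until one with current_range ≤ r is met
def pvCountA (x : Int) : List Int → Int
  | [] => 0
  | r :: rs => if x ≤ r then 0 else 1 + pvCountA x rs

def get_range_band (current_range : Int) : Int :=
  let counter := pvCountA current_range range_max_values
  if counter = (range_max_values.length : Int) then counter - 1 else counter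

-- ===== PORT B =====
-- bisect.bisect_left's loop: while lo < hi: mid = (lo+hi)//2; if a[mid] < x: lo = mid+1 else hi = mid
def pvBisectLeft (xs : List Int) (x : Int) (lo hi : Nat) : Nat :=
  if _h : lo < hi then
    let mid := (lo + hi) / 2
    if xs.getD mid 0 < x then pvBisectLeft xs x (mid + 1) hi
    else pvBisectLeft xs x lo mid
  else lo
termination_by hi - lo
decreasing_by all_goals omega

def get_range_band_alt (current_range : Int) : Int :=
  min ((pvBisectLeft range_max_values current_range 0 range_max_values.length : Int))
      ((range_max_values.length : Int) - 1)

-- ===== PRECONDITION & SPEC =====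
def Spec_get_range_band (current_range : Int) (out : Int) : Prop := out = get_range_band_alt current_range
instance (current_range : Int) (out : Int) : Decidable (Spec_get_range_band current_range out) := by unfold Spec_get_range_band; infer_instance

-- ===== CLAIM (what is proved, stated in full; the proofs are below) =====
def Claim_equal_get_range_band : Prop := ∀ (current_range : Int), Dom_get_range_band current_range → Spec_get_range_band current_range (get_range_band current_range)

-- ===== LEMMAS AND PROOFS =====

-- ===== VERDICT (by name: the statement is the Claim_ definition above) =====
theorem get_range_band_spec : Claim_equal_get_range_band := by
  intro x _
  unfold Spec_get_range_band get_range_band get_range_band_alt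
  simp only [range_max_values, pvCountA, List.length]
  unfold pvBisectLeft
  unfold pvBisectLeft
  unfold pvBisectLeft
  unfold pvBisectLeft
  norm_num [List.getD]
  split_ifs <;> omega
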